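-- pv_equiv track=rewrite | github.com/jet-zheng/data-mining | data_exp/documents/ProcessNameEntity.py | replaceNamedEntity
-- ===== SOURCE A (Python) =====
-- def replaceNamedEntity(namedEntitySets, sentenceWords):
--     '''替换被分割的命名实体
--     :param namedEntitySets, 命名实体构成的列表
--     :param sentenceWords, 一句话构成的列表, 每个元素为一个词
--     '''
--     replaceNeSenWords = []
--     sw_len = len(sentenceWords)
--
--     i = 0
--     while i < sw_len:
--         word = sentenceWords[i]
--         step = 1
--         j = i + 1
--         while j < sw_len:
--             saveWord = word
--             word += sentenceWords[j]
--             if inNamedEntitySets(namedEntitySets, word):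
--                 step += 1
--                 # 最后一个分词直接加入
--                 if j == (sw_len - 1):
--                     replaceNeSenWords.append(word)
--             else:
--                 replaceNeSenWords.append(saveWord)
--                 break
--             j += 1
--
--
--         if i == (sw_len - 1):
--             replaceNeSenWords.append(sentenceWords[i])
--
--         i += step
--     return replaceNeSenWords
--
-- def inNamedEntitySets(namedEntitySets, word):
--     for namedEntity in namedEntitySets:
--         if word == namedEntity:
--             return True
-- ===== SOURCE B (Python) =====
-- def replaceNamedEntity(namedEntitySets, sentenceWords):
--     '''Single linear pass with a pending accumulator instead of nested while-loops.'''
--     result = []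
--     acc = None
--     for w in sentenceWords:
--         if acc is None:
--             acc = w
--         elif (acc + w) in namedEntitySets:
--             acc = acc + w
--         else:
--             result.append(acc)
--             acc = w
--     if acc is not None:
--         result.append(acc)
--     return result
-- ===== Notes on version B (the rewrite author's own statement) =====
-- stated objective: simpler
-- what changed: Replaced the nested while-loops with index jumping, a step counter and three append sites by a single linear pass that keeps one pending accumulator, extending it while the concatenation is in the named-entity list and flushing it otherwise.
import Mathlib
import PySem

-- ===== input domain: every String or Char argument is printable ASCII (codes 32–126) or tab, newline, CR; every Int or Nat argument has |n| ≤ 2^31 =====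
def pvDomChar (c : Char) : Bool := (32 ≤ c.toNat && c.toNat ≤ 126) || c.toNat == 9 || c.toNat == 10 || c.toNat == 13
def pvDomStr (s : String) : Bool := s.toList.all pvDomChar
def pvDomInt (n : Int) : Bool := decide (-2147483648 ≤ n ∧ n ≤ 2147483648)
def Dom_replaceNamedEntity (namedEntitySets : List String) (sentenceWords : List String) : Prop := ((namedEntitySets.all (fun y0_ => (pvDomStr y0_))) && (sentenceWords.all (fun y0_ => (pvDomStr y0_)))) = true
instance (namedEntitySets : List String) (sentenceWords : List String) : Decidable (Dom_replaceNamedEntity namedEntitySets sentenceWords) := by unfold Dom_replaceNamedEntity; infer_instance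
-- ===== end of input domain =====

-- B replaces A's nested while-loops with index jumping, a step counter and three append
-- sites by one linear pass with a pending accumulator (objective: simpler).

-- ===== PORT A =====
-- helper inNamedEntitySets: linear scan, True on first ==, falsy (None) otherwise → Bool
def pvInNES (namedEntitySets : List String) (word : String) : Bool :=
  match namedEntitySets with
  | [] => false
  | ne :: rest => if word == ne then true else pvInNES rest word

-- inner while-loop of A, state (j, word, step, replaceNeSenWords); j stays < swLen under the
-- loop guard, so sentenceWords[j] is ported as getD (exact: index in range).  The structural
-- fuel only bounds the iteration count (each call with fuel ≥ swLen - j, as at every use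
-- below, never hits the fuel-0 branch, whose value anyway equals the loop-exit branch).
def pvInnerA (nes sws : List String) (swLen : Nat) :
    Nat → Nat → String → Nat → List String → List String × Nat
  | 0, _j, _word, step, res => (res, step)
  | fuel + 1, j, word, step, res =>
    if j < swLen then
      if pvInNES nes (word ++ sws.getD j "") then
        pvInnerA nes sws swLen fuel (j + 1) (word ++ sws.getD j "") (step + 1)
          (if j = swLen - 1 then res ++ [word ++ sws.getD j ""] else res)
      else (res ++ [word], step)
    else (res, step)

-- outer while-loop of A; i advances by step ≥ 1 each iteration, so fuel = swLen suffices
def pvOuterA (nes sws : List String) (swLen : Nat) :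
    Nat → Nat → List String → List String
  | 0, _i, res => res
  | fuel + 1, i, res =>
    if i < swLen then
      pvOuterA nes sws swLen fuel
        (i + (pvInnerA nes sws swLen swLen (i + 1) (sws.getD i "") 1 res).2)
        (if i = swLen - 1
          then (pvInnerA nes sws swLen swLen (i + 1) (sws.getD i "") 1 res).1 ++ [sws.getD i ""]
          else (pvInnerA nes sws swLen swLen (i + 1) (sws.getD i "") 1 res).1)
    else res

def replaceNamedEntity (namedEntitySets : List String) (sentenceWords : List String) : List String :=
  pvOuterA namedEntitySets sentenceWords sentenceWords.length sentenceWords.length 0 []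

-- ===== PORT B =====
-- one step of B's for-loop; state = (result, pending accumulator)
def pvStepB (nes : List String) (p : List String × Option String) (w : String) :
    List String × Option String :=
  match p.2 with
  | none => (p.1, some w)
  | some acc => if nes.contains (acc ++ w) then (p.1, some (acc ++ w)) else (p.1 ++ [acc], some w)

-- flush the pending accumulator after the loop
def pvFinB (st : List String × Option String) : List String :=
  match st.2 with
  | none => st.1
  | some acc => st.1 ++ [acc]

def replaceNamedEntity_alt (namedEntitySets : List String) (sentenceWords : List String) : List String :=
  pvFinB (sentenceWords.foldl (pvStepB namedEntitySets) ([], none))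

-- ===== PRECONDITION & SPEC =====
def Spec_replaceNamedEntity (namedEntitySets : List String) (sentenceWords : List String) (out : List String) : Prop := out = replaceNamedEntity_alt namedEntitySets sentenceWords
instance (namedEntitySets : List String) (sentenceWords : List String) (out : List String) : Decidable (Spec_replaceNamedEntity namedEntitySets sentenceWords out) := by unfold Spec_replaceNamedEntity; infer_instance

-- ===== CLAIM (what is proved, stated in full; the proofs are below) =====
def Claim_equal_replaceNamedEntity : Prop := ∀ (namedEntitySets : List String) (sentenceWords : List String), Dom_replaceNamedEntity namedEntitySets sentenceWords → Spec_replaceNamedEntity namedEntitySets sentenceWords (replaceNamedEntity namedEntitySets sentenceWords)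

-- ===== LEMMAS AND PROOFS =====

-- common specification: greedy merge as a clean structural recursion
def pvG (nes : List String) (acc : String) : List String → List String
  | [] => [acc]
  | w :: ws => if nes.contains (acc ++ w) then pvG nes (acc ++ w) ws else acc :: pvG nes w ws

lemma pvInNES_eq_contains (nes : List String) (w : String) :
    pvInNES nes w = nes.contains w := by
  induction nes with
  | nil => simp [pvInNES]
  | cons ne rest ih =>
      by_cases h : (w == ne) = true
      · have hw : w = ne := eq_of_beq h
        simp [pvInNES, hw]
      · have hw : w ≠ ne := fun e => h (by simp [e])
        simp [pvInNES, h, ih, hw]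

-- B side: the fold with a pending accumulator computes pvG
lemma foldB_eq_pvG (nes : List String) :
    ∀ (ws : List String) (res : List String) (acc : String),
      pvFinB (ws.foldl (pvStepB nes) (res, some acc)) = res ++ pvG nes acc ws := by
  intro ws
  induction ws with
  | nil => intro res acc; simp [pvFinB, pvG]
  | cons w ws ih =>
      intro res acc
      by_cases h : nes.contains (acc ++ w) = true
      · rw [List.foldl_cons]
        show pvFinB (ws.foldl (pvStepB nes)
          (if nes.contains (acc ++ w) then (res, some (acc ++ w)) else (res ++ [acc], some w))) = _
        rw [if_pos h, ih, pvG, if_pos h]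
      · rw [List.foldl_cons]
        show pvFinB (ws.foldl (pvStepB nes)
          (if nes.contains (acc ++ w) then (res, some (acc ++ w)) else (res ++ [acc], some w))) = _
        rw [if_neg h, ih, pvG, if_neg h]
        simp

lemma alt_eq_pvG (nes : List String) :
    ∀ sws : List String,
      replaceNamedEntity_alt nes sws = match sws with
        | [] => []
        | w :: ws => pvG nes w ws := by
  intro sws
  cases sws with
  | nil => simp [replaceNamedEntity_alt, pvFinB]
  | cons w ws =>
      show pvFinB ((w :: ws).foldl (pvStepB nes) ([], none)) = pvG nes w ws
      rw [List.foldl_cons]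
      show pvFinB (ws.foldl (pvStepB nes) ([], some w)) = pvG nes w ws
      simpa using foldB_eq_pvG nes ws [] w

-- when the inner guard fails the inner loop returns its state, at any fuel
lemma pvInnerA_stop (nes sws : List String) (swLen : Nat) :
    ∀ (fuel j : Nat) (word : String) (step : Nat) (res : List String), ¬ j < swLen →
      pvInnerA nes sws swLen fuel j word step res = (res, step) := by
  intro fuel j word step res hj
  cases fuel with
  | zero => rw [pvInnerA]
  | succ fuel => rw [pvInnerA, if_neg hj]

-- when the outer guard fails the outer loop returns its state, at any fuel
lemma pvOuterA_stop (nes sws : List String) (swLen : Nat) :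
    ∀ (fuel i : Nat) (res : List String), ¬ i < swLen →
      pvOuterA nes sws swLen fuel i res = res := by
  intro fuel i res hi
  cases fuel with
  | zero => rw [pvOuterA]
  | succ fuel => rw [pvOuterA, if_neg hi]

-- A side: the inner loop followed by the continuation of the outer loop computes pvG,
-- assuming the outer loop (at the continuation fuel f) is characterised at larger indices
lemma innerA_eq (nes sws : List String) (swLen : Nat) (hlen : swLen = sws.length)
    (i f : Nat)
    (hOut : ∀ i' res', i < i' →
      pvOuterA nes sws swLen f i' res' =
        res' ++ (if i' < swLen then pvG nes (sws.getD i' "") (sws.drop (i' + 1)) else [])) :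
    ∀ (fuel j : Nat) (word : String) (step : Nat) (res : List String), swLen - j ≤ fuel →
      i + step = j → i < j → j < swLen →
      pvOuterA nes sws swLen f (i + (pvInnerA nes sws swLen fuel j word step res).2)
          (pvInnerA nes sws swLen fuel j word step res).1
        = res ++ pvG nes word (sws.drop j) := by
  intro fuel
  induction fuel with
  | zero => intro j word step res hk hstep hij hjlt; omega
  | succ fuel ih =>
      intro j word step res hk hstep hij hjlt
      have hjlen : j < sws.length := by omega
      have hget : sws.getD j "" = sws[j] := List.getD_eq_getElem sws "" hjlen
      have hdrop : sws.drop j = sws[j] :: sws.drop (j + 1) := List.drop_eq_getElem_cons hjlen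
      rw [pvInnerA, if_pos hjlt]
      by_cases hm : pvInNES nes (word ++ sws.getD j "") = true
      · have hmem : nes.contains (word ++ sws[j]) = true := by
          rw [← hget, ← pvInNES_eq_contains]; exact hm
        rw [if_pos hm]
        by_cases hlast : j = swLen - 1
        · -- j is the last index: the word is appended and the recursive call exits
          have hj1 : ¬ (j + 1 < swLen) := by omega
          rw [if_pos hlast, pvInnerA_stop nes sws swLen fuel (j + 1) _ _ _ hj1]
          dsimp only
          rw [hOut (i + (step + 1)) _ (by omega),
            if_neg (show ¬ (i + (step + 1) < swLen) by omega)]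
          have hd1 : sws.drop (j + 1) = [] := List.drop_eq_nil_of_le (by omega)
          rw [hdrop, pvG, if_pos hmem, hd1, pvG, hget]
          simp
        · have hj1 : j + 1 < swLen := by omega
          rw [if_neg hlast, ih (j + 1) _ (step + 1) res (by omega) (by omega) (by omega) hj1,
            hdrop, pvG, if_pos hmem, hget]
      · have hmem : nes.contains (word ++ sws[j]) = false := by
          rw [← hget, ← pvInNES_eq_contains]; exact Bool.of_not_eq_true hm
        rw [if_neg hm]
        dsimp only
        rw [hstep, hOut j _ hij, if_pos hjlt, hdrop, pvG, hmem]
        simp [List.getElem?_eq_getElem hjlen]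

-- A side: the outer loop computes pvG at every index, given enough fuel
lemma outerA_eq (nes sws : List String) (swLen : Nat) (hlen : swLen = sws.length) :
    ∀ (fuel i : Nat) (res : List String), swLen - i ≤ fuel →
      pvOuterA nes sws swLen fuel i res =
        res ++ (if i < swLen then pvG nes (sws.getD i "") (sws.drop (i + 1)) else []) := by
  intro fuel
  induction fuel with
  | zero =>
      intro i res hk
      have hi : ¬ i < swLen := by omega
      rw [pvOuterA_stop nes sws swLen 0 i res hi, if_neg hi, List.append_nil]
  | succ fuel ih =>
      intro i res hk
      by_cases hi : i < swLen
      · have hOut : ∀ i' res', i < i' →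
            pvOuterA nes sws swLen fuel i' res' =
              res' ++ (if i' < swLen then pvG nes (sws.getD i' "") (sws.drop (i' + 1)) else []) := by
          intro i' res' hii'; exact ih i' res' (by omega)
        rw [pvOuterA, if_pos hi]
        by_cases hlast : i = swLen - 1
        · -- last index: the inner loop does not run, the word itself is appended
          have hj : ¬ (i + 1 < swLen) := by omega
          rw [if_pos hlast, pvInnerA_stop nes sws swLen swLen (i + 1) _ _ _ hj]
          dsimp only
          rw [hOut (i + 1) _ (by omega), if_neg hj, List.append_nil,
            if_pos hi, List.drop_eq_nil_of_le (by omega), pvG]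
        · rw [if_neg hlast,
            innerA_eq nes sws swLen hlen i fuel hOut swLen (i + 1) (sws.getD i "") 1 res
              (by omega) rfl (by omega) (by omega),
            if_pos hi]
      · rw [pvOuterA_stop nes sws swLen _ i res hi, if_neg hi, List.append_nil]

-- ===== VERDICT (by name: the statement is the Claim_ definition above) =====
theorem replaceNamedEntity_spec : Claim_equal_replaceNamedEntity := by
  intro nes sws _
  unfold Spec_replaceNamedEntity replaceNamedEntity
  rw [outerA_eq nes sws sws.length rfl sws.length 0 [] (by omega), alt_eq_pvG]
  cases sws with
  | nil => simp
  | cons w ws => simp
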